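-- pv_equiv track=rewrite | github.com/kachyna/AOC_2025 | 4_forklifts/script.py | solve2_BFS
-- ===== SOURCE A (Python) =====
-- MAX_ROLLS_AROUND = 4
--
-- def isAccessible( lines, x, y, max_x, max_y ):
--     rollCount = 0
--     # y
--     for j in range( y - 1, y + 2) :
--         # x
--         for i in range( x - 1, x + 2 ):
--             # If we are out of bounds or in the middle of the eight positions, skip and don't add anything
--             if ( i < 0 or i >= max_x or j < 0 or j >= max_y or ( i == x and j == y ) ) : continue
--             if lines[j][i] == '@' : rollCount += 1
--             if rollCount >= MAX_ROLLS_AROUND : return False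
--     return True
--
-- def removeRoll(lines, x, y) :
--     str = lines[y][0:x] + '.' + lines[y][x+1:]
--     return str
--
-- def appendStack(lines, x, y, max_x, max_y, stack ) :
--     for j in range( y - 1, y + 2) :
--         for i in range( x - 1, x + 2 ):
--             if ( i < 0 or i >= max_x or j < 0 or j >= max_y or ( i == x and j == y ) ) : continue
--             # Append only rolls, no point in appending empty indexes
--             if lines[j][i] == '@' : stack.append([i, j])
--     return stack
--
-- def solve2_BFS( lines ):
--     stack = []
--     max = { "x" : len( lines[0].strip() ), "y" : len( lines ) }
--     ret = 0
--
--     # At first, iterate through all rolls. Remove the ones that can be and fill the stack up with initial values.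
--     for y in range( 0 , max["y"] ):
--         for x in range( 0 , max["x"] ):
--             if lines[y][x] == '@' and isAccessible(lines, x, y, max["x"], max["y"]) :
--                 lines[y] = removeRoll( lines, x, y)
--                 stack = appendStack(lines, x, y, max["x"], max["y"], stack)
--                 ret += 1
--
--     # Once the stack is filled with values, we can launch it.
--     while( len(stack) != 0 ) :
--         x, y = stack.pop()
--         if lines[y][x] == '@' and isAccessible(lines, x, y, max["x"], max["y"]) :
--             # If we remove a roll, we need to add it back all its neighbors to the stack again.
--             lines[y] = removeRoll( lines, x, y)
--             stack = appendStack(lines, x, y, max["x"], max["y"], stack)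
--             ret += 1
--
--     return ret
-- ===== SOURCE B (Python) =====
-- # B: instead of A's grid-string mutation with per-test 3x3 rescans, keep the remaining
-- # rolls as a single dict  live[(x, y)] = current number of '@' neighbours  and peel by
-- # dict deletion / decrement; same scan order and LIFO worklist, so the returned count
-- # is identical.  (A mutates `lines` in place; B does not touch it — the equivalence
-- # claimed is about the RETURN value.)
--
-- def solve2_BFS(lines):
--     width = len(lines[0].strip())
--     height = len(lines)
--
--     def neighbours(x, y):
--         res = []
--         for j in range(y - 1, y + 2):
--             for i in range(x - 1, x + 2):
--                 if 0 <= i < width and 0 <= j < height and (i, j) != (x, y):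
--                     res.append((i, j))
--         return res
--
--     live = {}
--     for y in range(height):
--         for x in range(width):
--             if lines[y][x] == '@':
--                 live[(x, y)] = sum(1 for (i, j) in neighbours(x, y)
--                                    if lines[j][i] == '@')
--
--     ret = 0
--     stack = []
--
--     def peel(x, y):
--         del live[(x, y)]
--         for n in neighbours(x, y):
--             if n in live:
--                 live[n] -= 1
--                 stack.append(n)
--
--     for y in range(height):
--         for x in range(width):
--             if (x, y) in live and live[(x, y)] < 4:
--                 peel(x, y)
--                 ret += 1
--     while stack:
--         x, y = stack.pop()
--         if (x, y) in live and live[(x, y)] < 4: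
--             peel(x, y)
--             ret += 1
--     return ret
-- ===== Notes on version B (the rewrite author's own statement) =====
-- stated objective: alternative
-- what changed: A simulates peeling on the grid strings themselves, re-testing peelability by rescanning the 3x3 neighbourhood (isAccessible) and re-slicing rows; B replaces the grid state entirely by one dict live[(x,y)] = current '@'-neighbour count of each remaining roll, deciding peelability by a lookup (< 4) and peeling by dict deletion plus neighbour decrements, with A's scan order and LIFO worklist so the count is identical.
import Mathlib
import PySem

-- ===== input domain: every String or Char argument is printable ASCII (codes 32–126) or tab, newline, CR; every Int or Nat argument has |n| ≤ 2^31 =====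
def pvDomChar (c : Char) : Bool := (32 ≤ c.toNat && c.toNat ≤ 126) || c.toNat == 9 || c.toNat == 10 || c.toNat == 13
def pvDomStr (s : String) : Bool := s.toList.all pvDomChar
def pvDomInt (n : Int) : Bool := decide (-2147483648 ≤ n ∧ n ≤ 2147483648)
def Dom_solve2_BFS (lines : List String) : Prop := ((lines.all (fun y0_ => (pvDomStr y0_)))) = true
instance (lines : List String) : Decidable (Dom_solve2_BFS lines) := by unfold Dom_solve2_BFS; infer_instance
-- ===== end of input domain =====

-- B drops A's grid-string mutation and per-test 3x3 rescans: it keeps the remaining rolls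
-- as ONE dict live[(x,y)] = current '@'-neighbour count, peeling by dict deletion /
-- decrement; same scan order and LIFO worklist, so the returned count is identical.
-- (The Python A mutates `lines` in place; the Python B does not touch it — the
--  equivalence claimed here is about the RETURN value.)
-- Rows are handled as code-point lists (List Char), per the PySem convention for strings.

-- ===== PORT A =====

-- lines[y] : every read in either port is bounds-checked before the access, where this
-- equals Python's lines[y] (negative y never reaches the getD).
def gridRow (g : List (List Char)) (y : Int) : List Char :=
  if 0 ≤ y then g.getD y.toNat [] else []

-- lines[j][i] : exact for the bounds-checked accesses A performs.
def gridGet (g : List (List Char)) (j i : Int) : Char :=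
  if 0 ≤ i then (gridRow g j).getD i.toNat ' ' else ' '

-- lines[y] = row  (y is always ≥ 0 at the assignment sites)
def gridSet (g : List (List Char)) (y : Int) (row : List Char) : List (List Char) :=
  if 0 ≤ y then g.set y.toNat row else g

-- the nested 'for j in range(y-1,y+2): for i in range(x-1,x+2)' iteration, as (j,i) pairs
def cells3x3 (x y : Int) : List (Int × Int) :=
  (PySem.List.pyRange (y-1) (y+2) 1).flatMap (fun j =>
    (PySem.List.pyRange (x-1) (x+2) 1).map (fun i => (j, i)))

-- isAccessible's loop body: rollCount accumulator with the early 'return False'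
def isAccLoop (g : List (List Char)) (x y mx my : Int) :
    List (Int × Int) → Int → Bool
  | [], _ => true
  | (j, i) :: rest, cnt =>
    if i < 0 ∨ mx ≤ i ∨ j < 0 ∨ my ≤ j ∨ (i = x ∧ j = y) then
      isAccLoop g x y mx my rest cnt
    else
      let cnt' := if gridGet g j i = '@' then cnt + 1 else cnt
      if 4 ≤ cnt' then false else isAccLoop g x y mx my rest cnt'

def isAccessible (g : List (List Char)) (x y mx my : Int) : Bool :=
  isAccLoop g x y mx my (cells3x3 x y) 0

-- removeRoll: lines[y][0:x] + '.' + lines[y][x+1:]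
def removeRoll (g : List (List Char)) (x y : Int) : List Char :=
  PySem.List.slice (gridRow g y) (some 0) (some x) ++ ['.'] ++
    PySem.List.slice (gridRow g y) (some (x+1)) none

def appendStack (g : List (List Char)) (x y mx my : Int)
    (stack : List (Int × Int)) : List (Int × Int) :=
  (cells3x3 x y).foldl (fun st p =>
    if p.2 < 0 ∨ mx ≤ p.2 ∨ p.1 < 0 ∨ my ≤ p.1 ∨ (p.2 = x ∧ p.1 = y) then st
    else if gridGet g p.1 p.2 = '@' then st ++ [(p.2, p.1)] else st) stack

-- one body of A's scan / while loop: test, remove, push neighbours, count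
def stepA (mx my : Int) (s : List (List Char) × List (Int × Int) × Int)
    (x y : Int) : List (List Char) × List (Int × Int) × Int :=
  if gridGet s.1 y x = '@' ∧ isAccessible s.1 x y mx my then
    let g' := gridSet s.1 y (removeRoll s.1 x y)
    (g', appendStack g' x y mx my s.2.1, s.2.2 + 1)
  else s

-- total number of '@' cells: the termination measure for A's while loop
def atCount (g : List (List Char)) : Nat := (g.map (fun r => r.count '@')).sum

theorem atCount_remove_lt (g : List (List Char)) (x y : Int)
    (h : gridGet g y x = '@') :
    atCount (gridSet g y (removeRoll g x y)) < atCount g := by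
  have hspec : 0 ≤ y ∧ 0 ≤ x ∧ x.toNat < (gridRow g y).length ∧
      (gridRow g y).getD x.toNat ' ' = '@' := by
    unfold gridGet at h
    split at h
    · rename_i hx
      have hy : 0 ≤ y := by
        by_contra hy
        unfold gridRow at h
        rw [if_neg hy] at h
        simp at h
      have hlt : x.toNat < (gridRow g y).length := by
        by_contra hlt
        rw [List.getD_eq_getElem?_getD, List.getElem?_eq_none (by omega)] at h
        simp at h
      exact ⟨hy, hx, hlt, h⟩
    · simp at h
  obtain ⟨hy0, hx0, hlt, hrow⟩ := hspec
  have hylen : y.toNat < g.length := by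
    by_contra hy
    unfold gridRow at hlt
    rw [if_pos hy0, List.getD_eq_getElem?_getD, List.getElem?_eq_none (by omega)] at hlt
    simp at hlt
  have hrr : removeRoll g x y =
      (gridRow g y).take x.toNat ++ '.' :: (gridRow g y).drop (x.toNat + 1) := by
    unfold removeRoll
    rw [PySem.List.slice_zero_start, PySem.List.slice_to _ hx0,
        PySem.List.slice_from _ (by omega : (0:Int) ≤ x + 1),
        (by omega : (x + 1).toNat = x.toNat + 1)]
    simp
  rw [hrr]
  unfold atCount gridSet
  rw [if_pos hy0]
  set row := gridRow g y with hrowdef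
  have hgrow : g[y.toNat] = row := by
    rw [hrowdef]
    unfold gridRow
    rw [if_pos hy0, List.getD_eq_getElem?_getD, List.getElem?_eq_getElem hylen]
    rfl
  have hset : g.set y.toNat (row.take x.toNat ++ '.' :: row.drop (x.toNat+1)) =
      g.take y.toNat ++ (row.take x.toNat ++ '.' :: row.drop (x.toNat+1)) ::
        g.drop (y.toNat+1) := by
    rw [List.set_eq_take_append_cons_drop, if_pos hylen]
  have hg : g = g.take y.toNat ++ row :: g.drop (y.toNat+1) := by
    conv_lhs => rw [← List.take_append_drop y.toNat g]
    rw [← List.getElem_cons_drop hylen, hgrow]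
  have hcnt : (row.take x.toNat ++ '.' :: row.drop (x.toNat+1)).count '@' <
      row.count '@' := by
    have hx' : row[x.toNat] = '@' := by
      rw [List.getD_eq_getElem?_getD, List.getElem?_eq_getElem hlt] at hrow
      simpa using hrow
    conv_rhs => rw [← List.take_append_drop x.toNat row,
      ← List.getElem_cons_drop hlt, hx']
    simp [List.count_append]
  rw [hset]
  conv_rhs => rw [hg]
  simp only [List.map_append, List.map_cons, List.sum_append, List.sum_cons]
  omega

-- A's while loop; stack.pop() takes the LAST element
def loopA (mx my : Int) (g : List (List Char)) (stack : List (Int × Int))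
    (ret : Int) : Int :=
  match hp : stack.getLast? with
  | none => ret
  | some (x, y) =>
    let rest := stack.dropLast
    if gridGet g y x = '@' ∧ isAccessible g x y mx my then
      let g' := gridSet g y (removeRoll g x y)
      loopA mx my g' (appendStack g' x y mx my rest) (ret + 1)
    else loopA mx my g rest ret
termination_by (atCount g, stack.length)
decreasing_by
  · exact Prod.Lex.left _ _ (atCount_remove_lt _ _ _ (by simp_all))
  · have hne : stack ≠ [] := by intro hnil; rw [hnil] at hp; simp at hp
    have hpos : 0 < stack.length := List.length_pos_iff.mpr hne
    exact Prod.Lex.right _ (by simp [List.length_dropLast]; omega)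

def solve2_BFS (lines : List String) : Int :=
  let g0 := lines.map (·.toList)
  let mx : Int := (PySem.Chars.strip ((PySem.List.pyGetD lines 0 "").toList)).length
  let my : Int := lines.length
  let s1 := (PySem.List.pyRange 0 my 1).foldl (fun s y =>
      (PySem.List.pyRange 0 mx 1).foldl (fun s x => stepA mx my s x y) s)
    (g0, ([] : List (Int × Int)), (0 : Int))
  loopA mx my s1.1 s1.2.1 s1.2.2

-- ===== PORT B =====
-- B's state is ONE dict live[(x, y)] = current '@'-neighbour count of a remaining roll;
-- the grid is read only once, to build it.

-- lines[y][x] : exact for the in-range reads B performs (0 ≤ y < len(lines), 0 ≤ x < width)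
def charB (lines : List String) (y x : Int) : Char :=
  PySem.List.pyGetD (PySem.List.pyGetD lines y "").toList x ' '

-- neighbours(x, y): in-bounds neighbour coordinates, appended in j-then-i order
def nbrs (w h x y : Int) : List (Int × Int) :=
  (PySem.List.pyRange (y-1) (y+2)).foldl (fun res j =>
    (PySem.List.pyRange (x-1) (x+2)).foldl (fun res i =>
      if 0 ≤ i ∧ i < w ∧ 0 ≤ j ∧ j < h ∧ ¬(i = x ∧ j = y) then res ++ [(i, j)]
      else res) res) []

-- the initial dict: one entry per '@' cell, holding its '@'-neighbour count
def initLive (lines : List String) (w h : Int) : PySem.Dict (Int × Int) Int :=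
  (PySem.List.pyRange 0 h).foldl (fun d y =>
    (PySem.List.pyRange 0 w).foldl (fun d x =>
      if charB lines y x = '@' then
        d.insert (x, y)
          (((nbrs w h x y).countP (fun n => charB lines n.2 n.1 == '@') : Nat) : Int)
      else d) d) PySem.Dict.empty

-- peel(x, y): delete the roll's entry, decrement its live neighbours and push them
def peelCell (w h : Int) (live : PySem.Dict (Int × Int) Int)
    (stack : List (Int × Int)) (x y : Int) :
    PySem.Dict (Int × Int) Int × List (Int × Int) :=
  (nbrs w h x y).foldl (fun s n =>
    if s.1.contains n then (s.1.modify n 0 (· - 1), s.2 ++ [n]) else s)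
    (live.erase (x, y), stack)

-- the dict can only shrink through peelCell's fold (needed for loopB's termination)
theorem peelCell_fold_size_le (w h x y : Int)
    (s : PySem.Dict (Int × Int) Int × List (Int × Int)) :
    ((nbrs w h x y).foldl (fun s n =>
      if s.1.contains n then (s.1.modify n 0 (· - 1), s.2 ++ [n]) else s) s).1.size
      ≤ s.1.size := by
  generalize nbrs w h x y = l
  induction l generalizing s with
  | nil => simp
  | cons n t ih =>
    simp only [List.foldl_cons]
    refine le_trans (ih _) ?_
    by_cases hc : s.1.contains n
    · rw [if_pos hc]
      show (s.1.modify n 0 (· - 1)).size ≤ s.1.size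
      simp only [PySem.Dict.modify]
      rw [PySem.Dict.size_insert, if_pos hc]
    · rw [if_neg hc]

-- erasing a present key strictly shrinks the dict (needed for loopB's termination)
theorem erase_size_lt (live : PySem.Dict (Int × Int) Int) (k : Int × Int)
    (hc : live.contains k = true) : (live.erase k).size < live.size := by
  obtain ⟨l⟩ := live
  simp only [PySem.Dict.contains, List.any_eq_true] at hc
  obtain ⟨p, hp, hpk⟩ := hc
  simp only [PySem.Dict.erase, PySem.Dict.size]
  have : ∃ q ∈ l, ¬ ((fun q => !(q.1 == k)) q = true) := ⟨p, hp, by simp [hpk]⟩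
  exact List.length_filter_lt_length_iff_exists.mpr (by simpa using this)

theorem peelCell_size_lt (w h : Int) (live : PySem.Dict (Int × Int) Int)
    (stack : List (Int × Int)) (x y : Int) (hc : live.contains (x, y) = true) :
    (peelCell w h live stack x y).1.size < live.size := by
  unfold peelCell
  exact lt_of_le_of_lt (peelCell_fold_size_le w h x y (live.erase (x, y), stack))
    (erase_size_lt live (x, y) hc)

-- B's while loop; n = stack.pop() takes the LAST element
def loopB (w h : Int) (live : PySem.Dict (Int × Int) Int)
    (stack : List (Int × Int)) (ret : Int) : Int :=
  match hp : stack.getLast? with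
  | none => ret
  | some (x, y) =>
    if hc : live.contains (x, y) ∧ live.getD (x, y) 0 < 4 then
      let t := peelCell w h live stack.dropLast x y
      loopB w h t.1 t.2 (ret + 1)
    else loopB w h live stack.dropLast ret
termination_by (live.size, stack.length)
decreasing_by
  · exact Prod.Lex.left _ _ (peelCell_size_lt w h live stack.dropLast x y hc.1)
  · have hne : stack ≠ [] := by intro hnil; rw [hnil] at hp; simp at hp
    have hpos : 0 < stack.length := List.length_pos_iff.mpr hne
    exact Prod.Lex.right _ (by simp [List.length_dropLast]; omega)

-- body of B's initial scan over the grid coordinates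
def visitB (w h : Int)
    (s : PySem.Dict (Int × Int) Int × List (Int × Int) × Int) (x y : Int) :
    PySem.Dict (Int × Int) Int × List (Int × Int) × Int :=
  if s.1.contains (x, y) ∧ s.1.getD (x, y) 0 < 4 then
    let t := peelCell w h s.1 s.2.1 x y
    (t.1, t.2, s.2.2 + 1)
  else s

def solve2_BFS_alt (lines : List String) : Int :=
  let w : Int := (PySem.Chars.strip ((PySem.List.pyGetD lines 0 "").toList)).length
  let h : Int := lines.length
  let s := (PySem.List.pyRange 0 h).foldl (fun s y =>
      (PySem.List.pyRange 0 w).foldl (fun s x => visitB w h s x y) s)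
    (initLive lines w h, ([] : List (Int × Int)), (0 : Int))
  loopB w h s.1 s.2.1 s.2.2

-- ===== PRECONDITION & SPEC =====
-- Pre_: exactly the inputs on which the Python A returns (A indexes lines[0] and
-- reads every row at all columns < len(lines[0].strip()): an empty list or a row
-- shorter than that width raises IndexError).
def Pre_solve2_BFS (lines : List String) : Prop :=
  lines ≠ [] ∧
  ∀ s ∈ lines, (PySem.Chars.strip ((lines.headD "").toList)).length ≤ s.toList.length
instance (lines : List String) : Decidable (Pre_solve2_BFS lines) := by
  unfold Pre_solve2_BFS; infer_instance

def pvWitness_solve2_BFS : List String := ["@@.", ".@@", "@.."]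

def Spec_solve2_BFS (lines : List String) (out : Int) : Prop := out = solve2_BFS_alt lines
instance (lines : List String) (out : Int) : Decidable (Spec_solve2_BFS lines out) := by
  unfold Spec_solve2_BFS; infer_instance

-- ===== CLAIM (what is proved, stated in full; the proofs are below) =====
def Claim_equal_solve2_BFS : Prop := ∀ (lines : List String), Dom_solve2_BFS lines → Pre_solve2_BFS lines → Spec_solve2_BFS lines (solve2_BFS lines)

-- ===== LEMMAS AND PROOFS =====

-- the '@'-neighbour count of a cell: what both programs' tests are measured against
def nbrCount (g : List (List Char)) (mx my x y : Int) : Int :=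
  ((cells3x3 x y).countP (fun p =>
    decide (0 ≤ p.2 ∧ p.2 < mx ∧ 0 ≤ p.1 ∧ p.1 < my ∧ ¬(p.2 = x ∧ p.1 = y)) &&
    (gridGet g p.1 p.2 == '@')) : Nat)

-- live is exactly the set of remaining rolls, each mapped to its '@'-neighbour count
def LiveOK (g : List (List Char)) (live : PySem.Dict (Int × Int) Int)
    (mx my : Int) : Prop :=
  ∀ i j : Int, 0 ≤ i → i < mx → 0 ≤ j → j < my →
    live.get? (i, j) =
      if gridGet g j i = '@' then some (nbrCount g mx my i j) else none

-- every stacked coordinate (x, y) is in range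
def StackWF (stack : List (Int × Int)) (mx my : Int) : Prop :=
  ∀ p ∈ stack, 0 ≤ p.1 ∧ p.1 < mx ∧ 0 ≤ p.2 ∧ p.2 < my

-- simulation relation between A-states and B-states
def SimRel (mx my : Int) (sA : List (List Char) × List (Int × Int) × Int)
    (sB : PySem.Dict (Int × Int) Int × List (Int × Int) × Int) : Prop :=
  LiveOK sA.1 sB.1 mx my ∧ sA.2.1 = sB.2.1 ∧ sA.2.2 = sB.2.2 ∧
  StackWF sA.2.1 mx my

-- ---- grid access facts ----

theorem gridGet_spec (g : List (List Char)) (y x : Int) (h : gridGet g y x = '@') :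
    0 ≤ y ∧ 0 ≤ x ∧ x.toNat < (gridRow g y).length ∧
      (gridRow g y).getD x.toNat ' ' = '@' := by
  unfold gridGet at h
  split at h
  · rename_i hx
    have hy : 0 ≤ y := by
      by_contra hy
      unfold gridRow at h
      rw [if_neg hy] at h
      simp at h
    have hlt : x.toNat < (gridRow g y).length := by
      by_contra hlt
      rw [List.getD_eq_getElem?_getD, List.getElem?_eq_none (by omega)] at h
      simp at h
    exact ⟨hy, hx, hlt, h⟩
  · simp at h

theorem removeRoll_eq (g : List (List Char)) (x y : Int) (hx : 0 ≤ x) :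
    removeRoll g x y =
      (gridRow g y).take x.toNat ++ '.' :: (gridRow g y).drop (x.toNat + 1) := by
  unfold removeRoll
  rw [PySem.List.slice_zero_start, PySem.List.slice_to _ hx,
      PySem.List.slice_from _ (by omega : (0:Int) ≤ x + 1),
      (by omega : (x + 1).toNat = x.toNat + 1)]
  simp

theorem grid_len_pos (g : List (List Char)) (y x : Int) (hy0 : 0 ≤ y)
    (hlt : x.toNat < (gridRow g y).length) : y.toNat < g.length := by
  by_contra hy
  unfold gridRow at hlt
  rw [if_pos hy0, List.getD_eq_getElem?_getD, List.getElem?_eq_none (by omega)] at hlt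
  simp at hlt

theorem gridGet_set (g : List (List Char)) (x y : Int) (h : gridGet g y x = '@')
    (b a : Int) :
    gridGet (gridSet g y (removeRoll g x y)) b a =
      if b = y ∧ a = x then '.' else gridGet g b a := by
  obtain ⟨hy0, hx0, hlt, hrow⟩ := gridGet_spec g y x h
  have hylen : y.toNat < g.length := grid_len_pos g y x hy0 hlt
  rw [removeRoll_eq g x y hx0]
  set row := gridRow g y with hrowdef
  set row' := row.take x.toNat ++ '.' :: row.drop (x.toNat + 1) with hrow'
  have hpt : ∀ n : Nat, n ≠ x.toNat → row'[n]? = row[n]? := by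
    intro n hn
    rcases Nat.lt_or_ge n x.toNat with hlt' | hge
    · rw [hrow', List.getElem?_append_left (by simp; omega)]
      simp [hlt']
    · have hgt : x.toNat < n := by omega
      rw [hrow', List.getElem?_append_right (by simp; omega)]
      have hidx : n - (row.take x.toNat).length = (n - x.toNat - 1) + 1 := by
        simp; omega
      rw [hidx]
      simp [List.getElem?_drop]
      congr 1
      omega
  have hAt : row'[x.toNat]? = some '.' := by
    rw [hrow', List.getElem?_append_right (by simp)]
    have hz : x.toNat - (List.take x.toNat row).length = 0 := by simp; omega
    rw [hz]
    rfl
  have hrows : ∀ j : Int, gridRow (gridSet g y row') j =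
      if j = y then row' else gridRow g j := by
    intro j
    unfold gridRow gridSet
    rw [if_pos hy0]
    by_cases hj0 : 0 ≤ j
    · by_cases hjy : j = y
      · subst hjy
        rw [if_pos rfl, if_pos hj0, List.getD_eq_getElem?_getD,
            List.getElem?_set_self hylen]
        rfl
      · rw [if_neg hjy, if_pos hj0, if_pos hj0, List.getD_eq_getElem?_getD,
            List.getElem?_set_ne (by omega), ← List.getD_eq_getElem?_getD]
    · have hjy : ¬ j = y := by omega
      rw [if_neg hjy, if_neg hj0, if_neg hj0]
  unfold gridGet
  rw [hrows b]
  by_cases ha0 : 0 ≤ a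
  · rw [if_pos ha0, if_pos ha0]
    by_cases hby : b = y
    · subst hby
      rw [if_pos rfl]
      by_cases hax : a = x
      · subst hax
        rw [if_pos ⟨rfl, rfl⟩, List.getD_eq_getElem?_getD, hAt]
        rfl
      · rw [if_neg (by simp [hax]), List.getD_eq_getElem?_getD,
            hpt a.toNat (by omega), ← List.getD_eq_getElem?_getD]
    · rw [if_neg hby, if_neg (by simp [hby])]
  · rw [if_neg ha0, if_neg ha0, if_neg (by rintro ⟨_, rfl⟩; omega)]

-- charB reads the same character A's gridGet reads (same default, same underlying list)
theorem charB_eq_gridGet (lines : List String) (j i : Int) (hi : 0 ≤ i) (hj : 0 ≤ j) :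
    charB lines j i = gridGet (lines.map (·.toList)) j i := by
  unfold charB gridGet gridRow
  rw [if_pos hi, if_pos hj, PySem.List.pyGetD_of_nonneg _ _ hj,
      PySem.List.pyGetD_of_nonneg _ _ hi]
  congr 1
  simp only [List.getD_eq_getElem?_getD, List.getElem?_map]
  cases lines[j.toNat]? <;> rfl

-- ---- the 3x3 cell list ----

theorem cells3x3_eq (x y : Int) :
    cells3x3 x y = [(y-1,x-1),(y-1,x),(y-1,x+1),(y,x-1),(y,x),(y,x+1),
                    (y+1,x-1),(y+1,x),(y+1,x+1)] := by
  have e : ∀ a : Int, PySem.List.pyRange a (a+3) 1 = [a, a+1, a+2] := by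
    intro a
    rw [PySem.List.pyRange_one_cons (by omega), PySem.List.pyRange_one_cons (by omega),
        PySem.List.pyRange_one_cons (by omega), PySem.List.pyRange_one_eq_nil (by omega)]
    rw [(by ring : a+1+1 = a+2)]
  unfold cells3x3
  rw [(by ring : y+2 = (y-1)+3), (by ring : x+2 = (x-1)+3), e, e]
  simp only [List.flatMap_cons, List.flatMap_nil, List.map_cons, List.map_nil,
    List.append_nil, List.cons_append, List.nil_append, List.cons.injEq, Prod.mk.injEq]
  ring_nf
  simp

theorem mem_cells3x3 (x y : Int) (p : Int × Int) :
    p ∈ cells3x3 x y ↔ (y-1 ≤ p.1 ∧ p.1 ≤ y+1 ∧ x-1 ≤ p.2 ∧ p.2 ≤ x+1) := by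
  obtain ⟨j, i⟩ := p
  rw [cells3x3_eq]
  simp [Prod.ext_iff]
  omega

theorem nodup_cells3x3 (x y : Int) : (cells3x3 x y).Nodup := by
  rw [cells3x3_eq]
  simp [Prod.ext_iff]
  omega

-- the bounds-and-not-self test both loops of A perform, as one Bool
def posCond (mx my x y : Int) (p : Int × Int) : Bool :=
  decide (0 ≤ p.2 ∧ p.2 < mx ∧ 0 ≤ p.1 ∧ p.1 < my ∧ ¬(p.2 = x ∧ p.1 = y))

-- ---- nbrs is cells3x3 filtered by posCond and swapped to (x, y) order ----

theorem nbrs_eq (w h x y : Int) :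
    nbrs w h x y =
      ((cells3x3 x y).filter (posCond w h x y)).map (fun p => (p.2, p.1)) := by
  unfold nbrs cells3x3
  have hinner : ∀ (j : Int) (res : List (Int × Int)),
      (PySem.List.pyRange (x-1) (x+2)).foldl (fun res i =>
        if 0 ≤ i ∧ i < w ∧ 0 ≤ j ∧ j < h ∧ ¬(i = x ∧ j = y) then res ++ [(i, j)]
        else res) res
      = res ++ ((PySem.List.pyRange (x-1) (x+2)).filter
          (fun i => decide (0 ≤ i ∧ i < w ∧ 0 ≤ j ∧ j < h ∧ ¬(i = x ∧ j = y)))).map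
          (fun i => (i, j)) := by
    intro j res
    rw [← PySem.List.foldl_append_if
      (fun i => decide (0 ≤ i ∧ i < w ∧ 0 ≤ j ∧ j < h ∧ ¬(i = x ∧ j = y)))
      (fun i => (i, j))]
    apply List.foldl_ext
    intro st i _
    by_cases hcond : 0 ≤ i ∧ i < w ∧ 0 ≤ j ∧ j < h ∧ ¬(i = x ∧ j = y)
    · rw [if_pos hcond, if_pos (decide_eq_true hcond)]
    · rw [if_neg hcond, if_neg (by simpa using hcond)]
  have houter : (PySem.List.pyRange (y-1) (y+2)).foldl (fun res j =>
      (PySem.List.pyRange (x-1) (x+2)).foldl (fun res i =>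
        if 0 ≤ i ∧ i < w ∧ 0 ≤ j ∧ j < h ∧ ¬(i = x ∧ j = y) then res ++ [(i, j)]
        else res) res) []
      = [] ++ (PySem.List.pyRange (y-1) (y+2)).flatMap (fun j =>
          ((PySem.List.pyRange (x-1) (x+2)).filter
            (fun i => decide (0 ≤ i ∧ i < w ∧ 0 ≤ j ∧ j < h ∧ ¬(i = x ∧ j = y)))).map
            (fun i => (i, j))) := by
    rw [← PySem.List.foldl_append_eq_flatMap]
    apply List.foldl_ext
    intro res j _
    exact hinner j res
  rw [houter, List.nil_append, List.filter_flatMap, List.map_flatMap]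
  congr 1
  funext j
  rw [List.filter_map, List.map_map]
  rfl

theorem mem_nbrs (w h x y : Int) (n : Int × Int) :
    n ∈ nbrs w h x y ↔
      (0 ≤ n.1 ∧ n.1 < w ∧ 0 ≤ n.2 ∧ n.2 < h ∧
       y-1 ≤ n.2 ∧ n.2 ≤ y+1 ∧ x-1 ≤ n.1 ∧ n.1 ≤ x+1 ∧ ¬(n.1 = x ∧ n.2 = y)) := by
  rw [nbrs_eq, List.mem_map]
  constructor
  · rintro ⟨p, hp, rfl⟩
    rw [List.mem_filter] at hp
    have hm := (mem_cells3x3 x y p).mp hp.1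
    have hc := of_decide_eq_true hp.2
    simp only
    tauto
  · intro hcond
    obtain ⟨h1, h2, h3, h4, h5, h6, h7, h8, h9⟩ := hcond
    refine ⟨(n.2, n.1), ?_, rfl⟩
    rw [List.mem_filter]
    refine ⟨(mem_cells3x3 x y (n.2, n.1)).mpr (by simp only; omega), ?_⟩
    exact decide_eq_true ⟨h1, h2, h3, h4, h9⟩

theorem nodup_nbrs (w h x y : Int) : (nbrs w h x y).Nodup := by
  rw [nbrs_eq]
  refine List.Nodup.map ?_ ((nodup_cells3x3 x y).filter _)
  intro p q hpq
  have h1 : p.2 = q.2 := congrArg Prod.fst hpq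
  have h2 : p.1 = q.1 := congrArg Prod.snd hpq
  exact Prod.ext h2 h1

-- nbrs of a '@' cell after its removal: each live neighbour loses exactly one '@'
theorem countP_remove (q q' : Int × Int → Bool) (e : Int × Int)
    (l : List (Int × Int)) (hnd : l.Nodup) (hagree : ∀ p ∈ l, p ≠ e → q' p = q p)
    (he : q' e = false) :
    ((l.countP q' : Int)) =
      (l.countP q : Int) - (if e ∈ l ∧ q e = true then 1 else 0) := by
  induction l with
  | nil => simp
  | cons a t ih =>
    have hndt : t.Nodup := (List.nodup_cons.mp hnd).2
    have hat : a ∉ t := (List.nodup_cons.mp hnd).1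
    by_cases hae : a = e
    · have he' : q' a = false := by rw [hae]; exact he
      have het : e ∉ t := by rw [← hae]; exact hat
      have hcongr : t.countP q' = t.countP q :=
        List.countP_congr (fun p hp => by
          rw [hagree p (List.mem_cons_of_mem _ hp) (fun hpe => het (hpe ▸ hp))])
      rw [List.countP_cons, List.countP_cons, hcongr, he']
      have hmemq : (e ∈ a :: t ∧ q e = true) ↔ (q a = true) := by
        constructor
        · intro hh; rw [hae]; exact hh.2
        · intro hh; exact ⟨by simp [← hae], by rw [← hae]; exact hh⟩
      by_cases hq : q a = true
      · rw [if_pos (hmemq.mpr hq), hq]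
        push_cast
        simp
      · rw [if_neg (fun hh => hq (hmemq.mp hh))]
        rw [if_neg hq]
        push_cast
        simp
    · have hbits : q' a = q a := hagree a List.mem_cons_self hae
      have ihh := ih hndt (fun p hp hpe => hagree p (List.mem_cons_of_mem _ hp) hpe)
      have hmem : (e ∈ a :: t) ↔ (e ∈ t) := by
        rw [List.mem_cons]
        constructor
        · rintro (hh | hh)
          · exact absurd hh.symm hae
          · exact hh
        · exact Or.inr
      rw [List.countP_cons, List.countP_cons, hbits]
      by_cases hm : e ∈ t ∧ q e = true
      · have hm' : e ∈ a :: t ∧ q e = true := ⟨hmem.mpr hm.1, hm.2⟩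
        rw [if_pos hm']
        rw [if_pos hm] at ihh
        by_cases hq : q a = true <;> simp [hq] <;> omega
      · have hm' : ¬ (e ∈ a :: t ∧ q e = true) := fun hh => hm ⟨hmem.mp hh.1, hh.2⟩
        rw [if_neg hm']
        rw [if_neg hm] at ihh
        by_cases hq : q a = true <;> simp [hq] <;> omega

-- ---- isAccessible is the < 4 test on the neighbour count ----

theorem isAccLoop_eq (g : List (List Char)) (x y mx my : Int) :
    ∀ (cs : List (Int × Int)) (cnt : Int), cnt < 4 →
    isAccLoop g x y mx my cs cnt =
      decide (cnt + ((cs.countP (fun p =>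
        decide (0 ≤ p.2 ∧ p.2 < mx ∧ 0 ≤ p.1 ∧ p.1 < my ∧ ¬(p.2 = x ∧ p.1 = y)) &&
        (gridGet g p.1 p.2 == '@'))) : Nat) < 4) := by
  intro cs
  induction cs with
  | nil => intro cnt hcnt; simp [isAccLoop]; omega
  | cons p rest ih =>
    intro cnt hcnt
    obtain ⟨j, i⟩ := p
    simp only [isAccLoop]
    by_cases hskip : i < 0 ∨ mx ≤ i ∨ j < 0 ∨ my ≤ j ∨ (i = x ∧ j = y)
    · rw [if_pos hskip, ih cnt hcnt, List.countP_cons]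
      have hneg : ¬ (0 ≤ i ∧ i < mx ∧ 0 ≤ j ∧ j < my ∧ ¬(i = x ∧ j = y)) := by omega
      have hbit : ((decide (0 ≤ i ∧ i < mx ∧ 0 ≤ j ∧ j < my ∧ ¬(i = x ∧ j = y))) &&
          (gridGet g j i == '@')) = false := by
        rw [decide_eq_false hneg, Bool.false_and]
      rw [hbit]
      simp only [Bool.false_eq_true, if_false, add_zero]
    · rw [if_neg hskip]
      have hpos : (0 ≤ i ∧ i < mx ∧ 0 ≤ j ∧ j < my ∧ ¬(i = x ∧ j = y)) := by omega
      rw [List.countP_cons]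
      by_cases hat : gridGet g j i = '@'
      · rw [if_pos hat]
        have hbit : ((decide (0 ≤ i ∧ i < mx ∧ 0 ≤ j ∧ j < my ∧ ¬(i = x ∧ j = y))) &&
            (gridGet g j i == '@')) = true := by
          rw [decide_eq_true hpos, Bool.true_and, hat]
          simp
        rw [hbit]
        by_cases hc : (4:Int) ≤ cnt + 1
        · rw [if_pos hc]
          symm
          simp only [decide_eq_false_iff_not, not_lt]
          push_cast
          omega
        · rw [if_neg hc, ih (cnt+1) (by omega)]
          apply decide_eq_decide.mpr
          push_cast
          rw [if_pos rfl]
          omega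
      · rw [if_neg hat]
        have hbit : ((decide (0 ≤ i ∧ i < mx ∧ 0 ≤ j ∧ j < my ∧ ¬(i = x ∧ j = y))) &&
            (gridGet g j i == '@')) = false := by
          have hf : (gridGet g j i == '@') = false := by simp [hat]
          rw [hf, Bool.and_false]
        rw [hbit]
        rw [if_neg (by omega : ¬ (4:Int) ≤ cnt), ih cnt hcnt]
        simp only [Bool.false_eq_true, if_false, add_zero]

theorem isAccessible_eq (g : List (List Char)) (x y mx my : Int) :
    isAccessible g x y mx my = decide (nbrCount g mx my x y < 4) := by
  unfold isAccessible nbrCount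
  rw [isAccLoop_eq g x y mx my _ 0 (by omega)]
  norm_num

-- ---- appendStack decomposition ----

def pushes (g : List (List Char)) (mx my x y : Int) : List (Int × Int) :=
  (((cells3x3 x y).filter (fun p => posCond mx my x y p &&
      (gridGet g p.1 p.2 == '@'))).map (fun p => (p.2, p.1)))

theorem appendStack_eq (g : List (List Char)) (x y mx my : Int)
    (st : List (Int × Int)) :
    appendStack g x y mx my st = st ++ pushes g mx my x y := by
  unfold appendStack pushes
  have hfun : (fun (st : List (Int × Int)) (p : Int × Int) =>
      if p.2 < 0 ∨ mx ≤ p.2 ∨ p.1 < 0 ∨ my ≤ p.1 ∨ (p.2 = x ∧ p.1 = y) then st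
      else if gridGet g p.1 p.2 = '@' then st ++ [(p.2, p.1)] else st)
      = (fun st p => if (posCond mx my x y p && (gridGet g p.1 p.2 == '@')) = true
          then st ++ [(p.2, p.1)] else st) := by
    funext st p
    unfold posCond
    by_cases hskip : p.2 < 0 ∨ mx ≤ p.2 ∨ p.1 < 0 ∨ my ≤ p.1 ∨ (p.2 = x ∧ p.1 = y)
    · rw [if_pos hskip]
      have hneg : ¬ (0 ≤ p.2 ∧ p.2 < mx ∧ 0 ≤ p.1 ∧ p.1 < my ∧ ¬(p.2 = x ∧ p.1 = y)) := by
        omega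
      rw [decide_eq_false hneg, Bool.false_and]
      simp
    · rw [if_neg hskip]
      have hpos : (0 ≤ p.2 ∧ p.2 < mx ∧ 0 ≤ p.1 ∧ p.1 < my ∧ ¬(p.2 = x ∧ p.1 = y)) := by
        omega
      rw [decide_eq_true hpos, Bool.true_and]
      by_cases hat : gridGet g p.1 p.2 = '@'
      · rw [if_pos hat]
        simp [hat]
      · rw [if_neg hat]
        simp [hat]
  rw [hfun, PySem.List.foldl_append_if]

theorem pushes_wf (g : List (List Char)) (mx my x y : Int) :
    StackWF (pushes g mx my x y) mx my := by
  intro q hq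
  unfold pushes at hq
  rw [List.mem_map] at hq
  obtain ⟨p, hp, rfl⟩ := hq
  rw [List.mem_filter, Bool.and_eq_true] at hp
  have h1 := of_decide_eq_true hp.2.1
  exact ⟨h1.1, h1.2.1, h1.2.2.1, h1.2.2.2.1⟩

-- ---- dict lemmas specific to the two programs ----

theorem dict_get?_erase (d : PySem.Dict (Int × Int) Int) (k k' : Int × Int) :
    (d.erase k).get? k' = if k' = k then none else d.get? k' := by
  obtain ⟨l⟩ := d
  simp only [PySem.Dict.erase, PySem.Dict.get?]
  induction l with
  | nil => by_cases hk : k' = k <;> simp [hk]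
  | cons p t ih =>
    by_cases hpk : p.1 = k
    · rw [List.filter_cons_of_neg (by simp [hpk]), ih]
      by_cases hk : k' = k
      · rw [if_pos hk, if_pos hk]
      · rw [if_neg hk, if_neg hk,
            List.find?_cons_of_neg (by
              simp only [Bool.not_eq_true]
              exact beq_eq_false_iff_ne.mpr (by rw [hpk]; exact fun hh => hk hh.symm))]
    · rw [List.filter_cons_of_pos (by simp [hpk])]
      by_cases hpk' : p.1 = k'
      · rw [List.find?_cons_of_pos (by simp [hpk']),
            List.find?_cons_of_pos (by simp [hpk']),
            if_neg (fun hh => hpk (by rw [hpk', hh]))]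
      · rw [List.find?_cons_of_neg (by simp [hpk']),
            List.find?_cons_of_neg (by simp [hpk'])]
        exact ih

theorem dict_get?_modify (d : PySem.Dict (Int × Int) Int) (k k' : Int × Int)
    (f : Int → Int) :
    (d.modify k 0 f).get? k' = if k' = k then some (f (d.getD k 0)) else d.get? k' := by
  simp only [PySem.Dict.modify]
  rw [PySem.Dict.get?_insert]

-- the fold inside peelCell, characterised (l the neighbour list, d the start dict)
theorem peel_fold (l : List (Int × Int)) (hnd : l.Nodup) :
    ∀ (d : PySem.Dict (Int × Int) Int) (st : List (Int × Int)),
    (l.foldl (fun s n =>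
        if s.1.contains n then (s.1.modify n 0 (· - 1), s.2 ++ [n]) else s) (d, st)).2
      = st ++ l.filter (fun n => d.contains n) ∧
    ∀ k, (l.foldl (fun s n =>
        if s.1.contains n then (s.1.modify n 0 (· - 1), s.2 ++ [n]) else s) (d, st)).1.get? k
      = if k ∈ l ∧ d.contains k = true then some (d.getD k 0 - 1) else d.get? k := by
  induction l with
  | nil =>
    intro d st
    simp
  | cons n t ih =>
    intro d st
    have hnt : n ∉ t := (List.nodup_cons.mp hnd).1
    have iht := ih (List.nodup_cons.mp hnd).2
    simp only [List.foldl_cons]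
    by_cases hc : d.contains n = true
    · rw [if_pos hc]
      set d' := d.modify n 0 (· - 1) with hd'
      have hcont : ∀ k, d'.contains k = d.contains k := by
        intro k
        rw [PySem.Dict.contains_eq_isSome_get?, PySem.Dict.contains_eq_isSome_get?,
            hd', dict_get?_modify]
        by_cases hk : k = n
        · subst hk
          rw [if_pos rfl]
          rw [PySem.Dict.contains_eq_isSome_get?] at hc
          simp only [Option.isSome]
          cases hg : d.get? k
          · rw [hg] at hc; simp at hc
          · rfl
        · rw [if_neg hk]
      have hget : ∀ k, d'.get? k = if k = n then some (d.getD n 0 - 1) else d.get? k := by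
        intro k
        rw [hd', dict_get?_modify]
      obtain ⟨ihst, ihget⟩ := iht d' (st ++ [n])
      constructor
      · rw [ihst, List.filter_cons, if_pos hc, List.append_assoc,
            List.singleton_append,
            List.filter_congr (fun m (_ : m ∈ t) => hcont m)]
      · intro k
        rw [ihget k]
        by_cases hkt : k ∈ t ∧ d'.contains k = true
        · rw [if_pos hkt]
          have hkn : k ≠ n := fun hh => hnt (hh ▸ hkt.1)
          have hdc : d.contains k = true := by rw [← hcont]; exact hkt.2
          rw [if_pos ⟨List.mem_cons_of_mem _ hkt.1, hdc⟩]
          have : d'.getD k 0 = d.getD k 0 := by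
            rw [PySem.Dict.getD_eq_get?_getD, PySem.Dict.getD_eq_get?_getD,
                hget k, if_neg hkn]
          rw [this]
        · rw [if_neg hkt, hget k]
          by_cases hkn : k = n
          · subst hkn
            rw [if_pos rfl, if_pos ⟨List.mem_cons_self, hc⟩]
          · rw [if_neg hkn]
            rw [if_neg (by
              rintro ⟨hmem, hdc⟩
              rcases List.mem_cons.mp hmem with hh | hh
              · exact hkn hh
              · exact hkt ⟨hh, by rw [hcont]; exact hdc⟩)]
    · rw [if_neg hc]
      obtain ⟨ihst, ihget⟩ := iht d st
      constructor
      · rw [ihst, List.filter_cons, if_neg hc]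
      · intro k
        rw [ihget k]
        by_cases hkn : k = n
        · subst hkn
          rw [if_neg (by rintro ⟨_, hdc⟩; exact hc hdc),
              if_neg (by rintro ⟨hmem, hdc⟩; exact hc hdc)]
        · by_cases hkt : k ∈ t ∧ d.contains k = true
          · rw [if_pos hkt, if_pos ⟨List.mem_cons_of_mem _ hkt.1, hkt.2⟩]
          · rw [if_neg hkt, if_neg (by
              rintro ⟨hmem, hdc⟩
              rcases List.mem_cons.mp hmem with hh | hh
              · exact hkn hh
              · exact hkt ⟨hh, hdc⟩)]

-- ---- initLive builds exactly the '@'-cells dict ----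

theorem get?_foldl_insert_cond (P : Int × Int → Prop) [DecidablePred P]
    (f : Int × Int → Int) :
    ∀ (l : List (Int × Int)) (d : PySem.Dict (Int × Int) Int) (k : Int × Int),
    (l.foldl (fun d n => if P n then d.insert n (f n) else d) d).get? k
      = if k ∈ l ∧ P k then some (f k) else d.get? k := by
  intro l
  induction l with
  | nil =>
    intro d k
    simp
  | cons n t ih =>
    intro d k
    simp only [List.foldl_cons]
    rw [ih]
    by_cases hkt : k ∈ t ∧ P k
    · rw [if_pos hkt, if_pos ⟨List.mem_cons_of_mem _ hkt.1, hkt.2⟩]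
    · rw [if_neg hkt]
      by_cases hP : P n
      · rw [if_pos hP, PySem.Dict.get?_insert]
        by_cases hkn : k = n
        · subst hkn
          rw [if_pos rfl, if_pos ⟨List.mem_cons_self, hP⟩]
        · rw [if_neg hkn, if_neg (by
            rintro ⟨hmem, hPk⟩
            rcases List.mem_cons.mp hmem with hh | hh
            · exact hkn hh
            · exact hkt ⟨hh, hPk⟩)]
      · rw [if_neg hP, if_neg (by
          rintro ⟨hmem, hPk⟩
          rcases List.mem_cons.mp hmem with hh | hh
          · exact hP (hh ▸ hPk)
          · exact hkt ⟨hh, hPk⟩)]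

theorem initLive_get? (lines : List String) (w h : Int) (k : Int × Int) :
    (initLive lines w h).get? k =
      if (0 ≤ k.1 ∧ k.1 < w ∧ 0 ≤ k.2 ∧ k.2 < h) ∧ charB lines k.2 k.1 = '@' then
        some (((nbrs w h k.1 k.2).countP
          (fun n => charB lines n.2 n.1 == '@') : Nat) : Int)
      else none := by
  have hflat : initLive lines w h =
      ((PySem.List.pyRange 0 h).flatMap (fun y =>
        (PySem.List.pyRange 0 w).map (fun x => (x, y)))).foldl
        (fun d n => if charB lines n.2 n.1 = '@' then
          d.insert n (((nbrs w h n.1 n.2).countP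
            (fun m => charB lines m.2 m.1 == '@') : Nat) : Int)
          else d) PySem.Dict.empty := by
    rw [List.foldl_flatMap]
    unfold initLive
    apply List.foldl_ext
    intro d y _
    rw [List.foldl_map]
  rw [hflat, get?_foldl_insert_cond (fun n => charB lines n.2 n.1 = '@')
    (fun n => (((nbrs w h n.1 n.2).countP
      (fun m => charB lines m.2 m.1 == '@') : Nat) : Int))]
  rw [PySem.Dict.get?_empty]
  congr 1
  have hmem : k ∈ (PySem.List.pyRange 0 h).flatMap (fun y =>
      (PySem.List.pyRange 0 w).map (fun x => (x, y))) ↔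
      (0 ≤ k.1 ∧ k.1 < w ∧ 0 ≤ k.2 ∧ k.2 < h) := by
    rw [List.mem_flatMap]
    constructor
    · rintro ⟨y, hy, hk⟩
      rw [List.mem_map] at hk
      obtain ⟨x, hx, rfl⟩ := hk
      rw [PySem.List.mem_pyRange_one] at hy hx
      simp only
      omega
    · rintro ⟨h1, h2, h3, h4⟩
      refine ⟨k.2, PySem.List.mem_pyRange_one.mpr ⟨h3, h4⟩, ?_⟩
      rw [List.mem_map]
      exact ⟨k.1, PySem.List.mem_pyRange_one.mpr ⟨h1, h2⟩, rfl⟩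
  rw [eq_iff_iff]
  constructor
  · rintro ⟨hm, hat⟩; exact ⟨hmem.mp hm, hat⟩
  · rintro ⟨hm, hat⟩; exact ⟨hmem.mpr hm, hat⟩

-- the countP over nbrs IS nbrCount
theorem countP_nbrs_eq (lines : List String) (w h x y : Int) :
    (((nbrs w h x y).countP (fun n => charB lines n.2 n.1 == '@') : Nat) : Int)
      = nbrCount (lines.map (·.toList)) w h x y := by
  unfold nbrCount
  congr 1
  rw [nbrs_eq, List.countP_map, List.countP_filter]
  apply List.countP_congr
  intro p hp
  show (((charB lines p.1 p.2 == '@') && posCond w h x y p) = true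
      ↔ ((decide (0 ≤ p.2 ∧ p.2 < w ∧ 0 ≤ p.1 ∧ p.1 < h ∧ ¬(p.2 = x ∧ p.1 = y)) &&
         (gridGet (lines.map (·.toList)) p.1 p.2 == '@')) = true))
  by_cases hpc : (0 ≤ p.2 ∧ p.2 < w ∧ 0 ≤ p.1 ∧ p.1 < h ∧ ¬(p.2 = x ∧ p.1 = y))
  · have h1 : posCond w h x y p = true := decide_eq_true hpc
    have h2 : decide (0 ≤ p.2 ∧ p.2 < w ∧ 0 ≤ p.1 ∧ p.1 < h ∧ ¬(p.2 = x ∧ p.1 = y))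
        = true := decide_eq_true hpc
    rw [h1, h2, Bool.and_true, Bool.true_and,
        charB_eq_gridGet lines p.1 p.2 (by omega) (by omega)]
  · have h1 : posCond w h x y p = false := decide_eq_false hpc
    have h2 : decide (0 ≤ p.2 ∧ p.2 < w ∧ 0 ≤ p.1 ∧ p.1 < h ∧ ¬(p.2 = x ∧ p.1 = y))
        = false := decide_eq_false hpc
    rw [h1, h2, Bool.and_false, Bool.false_and]

-- the initial dict satisfies the invariant
theorem initLive_ok (lines : List String) (w h : Int) :
    LiveOK (lines.map (·.toList)) (initLive lines w h) w h := by
  intro i j hi hi' hj hj'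
  rw [initLive_get?]
  rw [charB_eq_gridGet lines j i hi hj]
  by_cases hat : gridGet (lines.map (·.toList)) j i = '@'
  · rw [if_pos ⟨⟨hi, hi', hj, hj'⟩, hat⟩, if_pos hat, countP_nbrs_eq lines w h i j]
  · rw [if_neg (by rintro ⟨_, hc⟩; exact hat hc), if_neg hat]

-- ---- the neighbour count after one removal ----

theorem nbrCount_peel (g : List (List Char)) (mx my x y : Int)
    (hat : gridGet g y x = '@') (hx : 0 ≤ x) (hx' : x < mx) (hy : 0 ≤ y) (hy' : y < my)
    (i j : Int) (hi : 0 ≤ i) (hi' : i < mx) (hj : 0 ≤ j) (hj' : j < my)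
    (hne : ¬(i = x ∧ j = y)) :
    nbrCount (gridSet g y (removeRoll g x y)) mx my i j
      = nbrCount g mx my i j - (if (i, j) ∈ nbrs mx my x y then 1 else 0) := by
  unfold nbrCount
  rw [countP_remove _ _ (y, x) _ (nodup_cells3x3 i j) ?_ ?_]
  · congr 1
    refine if_congr ?_ rfl rfl
    constructor
    · rintro ⟨hmm, _⟩
      have hbox := (mem_cells3x3 i j (y, x)).mp hmm
      simp only at hbox
      rw [mem_nbrs]
      simp only
      exact ⟨hi, hi', hj, hj', by omega, by omega, by omega, by omega, hne⟩
    · intro hmem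
      have hm := (mem_nbrs mx my x y (i, j)).mp hmem
      simp only at hm
      refine ⟨(mem_cells3x3 i j (y, x)).mpr (by simp only; omega), ?_⟩
      rw [Bool.and_eq_true]
      refine ⟨decide_eq_true ⟨hx, hx', hy, hy',
        fun hh => hne ⟨hh.1.symm, hh.2.symm⟩⟩, by simp [hat]⟩
  · intro p hp hpe
    obtain ⟨p1, p2⟩ := p
    have hgg : gridGet (gridSet g y (removeRoll g x y)) p1 p2 = gridGet g p1 p2 := by
      rw [gridGet_set g x y hat p1 p2, if_neg (by
        rintro ⟨h1, h2⟩
        exact hpe (by rw [h1, h2]))]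
    simp only
    rw [hgg]
  · have hdot : gridGet (gridSet g y (removeRoll g x y)) y x = '.' := by
      rw [gridGet_set g x y hat y x, if_pos ⟨rfl, rfl⟩]
    simp only
    rw [hdot]
    simp

-- ---- the peel step preserves the invariant and pushes exactly A's neighbours ----

theorem liveOK_peel (g : List (List Char)) (live : PySem.Dict (Int × Int) Int)
    (mx my x y : Int) (hok : LiveOK g live mx my)
    (hx : 0 ≤ x) (hx' : x < mx) (hy : 0 ≤ y) (hy' : y < my)
    (hat : gridGet g y x = '@') (st : List (Int × Int)) :
    LiveOK (gridSet g y (removeRoll g x y)) (peelCell mx my live st x y).1 mx my ∧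
    (peelCell mx my live st x y).2 =
      st ++ pushes (gridSet g y (removeRoll g x y)) mx my x y := by
  set g' := gridSet g y (removeRoll g x y) with hg'
  have hd0get : ∀ k : Int × Int, (live.erase (x, y)).get? k =
      if k = (x, y) then none else live.get? k :=
    fun k => dict_get?_erase live (x, y) k
  have hd0contains : ∀ n : Int × Int, n ∈ nbrs mx my x y →
      ((live.erase (x, y)).contains n = (gridGet g' n.2 n.1 == '@')) := by
    intro n hn
    have hm := (mem_nbrs mx my x y n).mp hn
    have hne : n ≠ (x, y) := by
      intro hh
      exact hm.2.2.2.2.2.2.2.2 (by rw [hh]; exact ⟨rfl, rfl⟩)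
    rw [PySem.Dict.contains_eq_isSome_get?, hd0get, if_neg hne,
        hok n.1 n.2 hm.1 hm.2.1 hm.2.2.1 hm.2.2.2.1]
    have hgg : gridGet g' n.2 n.1 = gridGet g n.2 n.1 := by
      rw [hg', gridGet_set g x y hat n.2 n.1, if_neg (by
        rintro ⟨h1, h2⟩
        exact hne (by rw [Prod.ext_iff]; exact ⟨h2, h1⟩))]
    rw [hgg]
    by_cases hgc : gridGet g n.2 n.1 = '@'
    · simp [hgc]
    · simp [hgc]
  obtain ⟨hst, hget⟩ :=
    peel_fold (nbrs mx my x y) (nodup_nbrs mx my x y) (live.erase (x, y)) st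
  constructor
  · -- the dict after the fold satisfies the invariant for g'
    intro i j hi hi' hj hj'
    show (peelCell mx my live st x y).1.get? (i, j) = _
    unfold peelCell
    rw [hget (i, j)]
    by_cases hcij : (i, j) = ((x, y) : Int × Int)
    · rw [Prod.mk.injEq] at hcij
      obtain ⟨rfl, rfl⟩ := hcij
      have hmemn : (i, j) ∉ nbrs mx my i j := by
        intro hn
        exact ((mem_nbrs mx my i j (i, j)).mp hn).2.2.2.2.2.2.2.2 ⟨rfl, rfl⟩
      rw [if_neg (by rintro ⟨hmem, _⟩; exact hmemn hmem), hd0get, if_pos rfl]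
      have hdot : gridGet g' j i = '.' := by
        rw [hg', gridGet_set g i j hat j i, if_pos ⟨rfl, rfl⟩]
      rw [if_neg (by rw [hdot]; decide)]
    · have hgg : gridGet g' j i = gridGet g j i := by
        rw [hg', gridGet_set g x y hat j i, if_neg (by
          rintro ⟨h1, h2⟩
          exact hcij (by rw [Prod.ext_iff]; exact ⟨h2, h1⟩))]
      have hnec : ¬ (i = x ∧ j = y) := by
        rintro ⟨rfl, rfl⟩
        exact hcij rfl
      by_cases hmem : (i, j) ∈ nbrs mx my x y
      · have hcd0 := hd0contains (i, j) hmem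
        by_cases hgc : gridGet g j i = '@'
        · have hcb : ((live.erase (x, y)).contains (i, j)) = true := by
            rw [hcd0]
            show (gridGet g' j i == '@') = true
            rw [hgg]
            simp [hgc]
          rw [if_pos ⟨hmem, hcb⟩]
          have hd0v : (live.erase (x, y)).getD (i, j) 0 = nbrCount g mx my i j := by
            rw [PySem.Dict.getD_eq_get?_getD, hd0get, if_neg hcij,
                hok i j hi hi' hj hj', if_pos hgc]
            rfl
          rw [hd0v, hgg, if_pos hgc, hg',
              nbrCount_peel g mx my x y hat hx hx' hy hy' i j hi hi' hj hj' hnec,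
              if_pos hmem]
        · have hcb : ((live.erase (x, y)).contains (i, j)) = false := by
            rw [hcd0]
            show (gridGet g' j i == '@') = false
            rw [hgg]
            simp [hgc]
          rw [if_neg (by rintro ⟨_, hdc⟩; rw [hcb] at hdc; cases hdc)]
          rw [hd0get, if_neg hcij, hok i j hi hi' hj hj', if_neg hgc, hgg, if_neg hgc]
      · rw [if_neg (by rintro ⟨hm, _⟩; exact hmem hm), hd0get, if_neg hcij,
            hok i j hi hi' hj hj', hgg]
        have hcnt : nbrCount g' mx my i j = nbrCount g mx my i j := by
          rw [hg',
            nbrCount_peel g mx my x y hat hx hx' hy hy' i j hi hi' hj hj' hnec,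
            if_neg hmem]
          ring
        rw [hcnt]
  · -- the stack after the fold is exactly A's pushes
    show (peelCell mx my live st x y).2 = _
    unfold peelCell
    rw [hst]
    congr 1
    rw [nbrs_eq, List.filter_map, List.filter_filter]
    unfold pushes
    congr 1
    apply List.filter_congr
    intro p hp
    show (((live.erase (x, y)).contains (p.2, p.1)) && posCond mx my x y p)
        = (posCond mx my x y p && (gridGet g' p.1 p.2 == '@'))
    by_cases hpc : posCond mx my x y p = true
    · rw [hpc, Bool.and_true, Bool.true_and]
      have hb := of_decide_eq_true (by rw [← hpc]; rfl :
        decide (0 ≤ p.2 ∧ p.2 < mx ∧ 0 ≤ p.1 ∧ p.1 < my ∧ ¬(p.2 = x ∧ p.1 = y)) = true)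
      have hbox := (mem_cells3x3 x y p).mp hp
      have hmemn : ((p.2, p.1) : Int × Int) ∈ nbrs mx my x y := by
        rw [mem_nbrs]
        simp only
        tauto
      have := hd0contains (p.2, p.1) hmemn
      simpa using this
    · rw [Bool.not_eq_true] at hpc
      rw [hpc, Bool.and_false, Bool.false_and]

-- ---- the two decisions agree under the invariant ----

theorem decision_eq (g : List (List Char)) (live : PySem.Dict (Int × Int) Int)
    (mx my x y : Int) (hok : LiveOK g live mx my)
    (hx : 0 ≤ x) (hx' : x < mx) (hy : 0 ≤ y) (hy' : y < my) :
    ((gridGet g y x = '@' ∧ isAccessible g x y mx my = true) ↔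
      (live.contains (x, y) = true ∧ live.getD (x, y) 0 < 4)) := by
  rw [isAccessible_eq, PySem.Dict.contains_eq_isSome_get?,
      PySem.Dict.getD_eq_get?_getD, hok x y hx hx' hy hy']
  by_cases hg : gridGet g y x = '@'
  · rw [if_pos hg]
    simp [hg]
  · rw [if_neg hg]
    simp [hg]

-- ---- step and fold simulation ----

theorem step_rel (mx my : Int) (sA : List (List Char) × List (Int × Int) × Int)
    (sB : PySem.Dict (Int × Int) Int × List (Int × Int) × Int)
    (x y : Int) (hx : 0 ≤ x) (hx' : x < mx) (hy : 0 ≤ y) (hy' : y < my)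
    (h : SimRel mx my sA sB) :
    SimRel mx my (stepA mx my sA x y) (visitB mx my sB x y) := by
  obtain ⟨hok, hst, hret, hwf⟩ := h
  unfold stepA visitB
  by_cases hdec : gridGet sA.1 y x = '@' ∧ isAccessible sA.1 x y mx my = true
  · have hdecB := (decision_eq sA.1 sB.1 mx my x y hok hx hx' hy hy').mp hdec
    rw [if_pos hdec, if_pos hdecB]
    obtain ⟨hok', hstk⟩ :=
      liveOK_peel sA.1 sB.1 mx my x y hok hx hx' hy hy' hdec.1 sB.2.1
    refine ⟨hok', ?_, ?_, ?_⟩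
    · show appendStack (gridSet sA.1 y (removeRoll sA.1 x y)) x y mx my sA.2.1
        = (peelCell mx my sB.1 sB.2.1 x y).2
      rw [hst, appendStack_eq, hstk]
    · show sA.2.2 + 1 = sB.2.2 + 1
      rw [hret]
    · show StackWF (appendStack (gridSet sA.1 y (removeRoll sA.1 x y)) x y mx my sA.2.1) mx my
      rw [appendStack_eq]
      intro q hq
      rw [List.mem_append] at hq
      rcases hq with hq | hq
      · exact hwf q hq
      · exact pushes_wf _ mx my x y q hq
  · rw [if_neg hdec,
        if_neg (fun hh => hdec ((decision_eq sA.1 sB.1 mx my x y hok hx hx' hy hy').mpr hh))]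
    exact ⟨hok, hst, hret, hwf⟩

theorem loopA_none (mx my : Int) (g : List (List Char)) (stack : List (Int × Int))
    (ret : Int) (hp : stack.getLast? = none) : loopA mx my g stack ret = ret := by
  rw [loopA.eq_def]
  split
  · rfl
  · rename_i heq
    rw [hp] at heq
    cases heq

theorem loopA_pop (mx my : Int) (g : List (List Char)) (stack : List (Int × Int))
    (ret x y : Int) (hp : stack.getLast? = some (x, y)) :
    loopA mx my g stack ret =
      if gridGet g y x = '@' ∧ isAccessible g x y mx my = true then
        loopA mx my (gridSet g y (removeRoll g x y))
          (appendStack (gridSet g y (removeRoll g x y)) x y mx my stack.dropLast)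
          (ret + 1)
      else loopA mx my g stack.dropLast ret := by
  rw [loopA.eq_def]
  split
  · rename_i heq
    rw [hp] at heq
    cases heq
  · rename_i x' y' heq
    rw [hp] at heq
    injection heq with heq2
    injection heq2 with h1 h2
    subst h1
    subst h2
    rfl

theorem loopB_none (w h : Int) (live : PySem.Dict (Int × Int) Int)
    (stack : List (Int × Int)) (ret : Int) (hp : stack.getLast? = none) :
    loopB w h live stack ret = ret := by
  rw [loopB.eq_def]
  split
  · rfl
  · rename_i heq
    rw [hp] at heq
    cases heq

theorem loopB_pop (w h : Int) (live : PySem.Dict (Int × Int) Int)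
    (stack : List (Int × Int)) (ret x y : Int) (hp : stack.getLast? = some (x, y)) :
    loopB w h live stack ret =
      if live.contains (x, y) ∧ live.getD (x, y) 0 < 4 then
        loopB w h (peelCell w h live stack.dropLast x y).1
          (peelCell w h live stack.dropLast x y).2 (ret + 1)
      else loopB w h live stack.dropLast ret := by
  rw [loopB.eq_def]
  split
  · rename_i heq
    rw [hp] at heq
    cases heq
  · rename_i x' y' heq
    rw [hp] at heq
    injection heq with heq2
    injection heq2 with h1 h2
    subst h1
    subst h2
    by_cases hc : live.contains (x, y) ∧ live.getD (x, y) 0 < 4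
    · rw [dif_pos hc, if_pos hc]
    · rw [dif_neg hc, if_neg hc]

theorem loop_sim (mx my : Int) :
    ∀ (g : List (List Char)) (stack : List (Int × Int)) (ret : Int)
      (live : PySem.Dict (Int × Int) Int), LiveOK g live mx my →
      StackWF stack mx my →
      loopA mx my g stack ret = loopB mx my live stack ret := by
  intro g stack ret
  induction g, stack, ret using loopA.induct mx my with
  | case1 g stack ret hp =>
    intro live hok hwf
    rw [loopA_none mx my g stack ret hp, loopB_none mx my live stack ret hp]
  | case2 g stack ret x y hp rest hdec gp ih =>
    intro live hok hwf
    obtain ⟨ys, rfl⟩ := List.getLast?_eq_some_iff.mp hp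
    have hxy := hwf (x, y) (by simp)
    rw [loopA_pop mx my g _ ret x y hp, loopB_pop mx my live _ ret x y hp]
    have hdecB :=
      (decision_eq g live mx my x y hok hxy.1 hxy.2.1 hxy.2.2.1 hxy.2.2.2).mp hdec
    rw [if_pos hdec, if_pos hdecB]
    obtain ⟨hok', hstk⟩ := liveOK_peel g live mx my x y hok hxy.1 hxy.2.1 hxy.2.2.1
      hxy.2.2.2 hdec.1 (ys ++ [(x, y)]).dropLast
    have hwf' : StackWF (appendStack (gridSet g y (removeRoll g x y)) x y mx my
        (ys ++ [(x, y)]).dropLast) mx my := by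
      rw [appendStack_eq]
      intro q hq
      rw [List.mem_append] at hq
      rcases hq with hq | hq
      · refine hwf q ?_
        rw [List.dropLast_concat] at hq
        simp [hq]
      · exact pushes_wf _ mx my x y q hq
    have hgoal := ih _ hok' hwf'
    rw [hstk, ← appendStack_eq]
    exact hgoal
  | case3 g stack ret x y hp rest hdec ih =>
    intro live hok hwf
    obtain ⟨ys, rfl⟩ := List.getLast?_eq_some_iff.mp hp
    have hxy := hwf (x, y) (by simp)
    have hdecB : ¬ (live.contains (x, y) = true ∧ live.getD (x, y) 0 < 4) := fun hh =>
      hdec ((decision_eq g live mx my x y hok hxy.1 hxy.2.1 hxy.2.2.1 hxy.2.2.2).mpr hh)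
    rw [loopA_pop mx my g _ ret x y hp, loopB_pop mx my live _ ret x y hp,
        if_neg hdec, if_neg hdecB]
    exact ih live hok (fun q hq => hwf q (by
      change q ∈ (ys ++ [(x, y)]).dropLast at hq
      rw [List.dropLast_concat] at hq
      simp [hq]))

theorem fold_inner (mx my y : Int) (hy0 : 0 ≤ y) (hy' : y < my) :
    ∀ (xs : List Int), (∀ x ∈ xs, 0 ≤ x ∧ x < mx) →
    ∀ sA sB, SimRel mx my sA sB →
    SimRel mx my (xs.foldl (fun s x => stepA mx my s x y) sA)
      (xs.foldl (fun s x => visitB mx my s x y) sB) := by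
  intro xs
  induction xs with
  | nil => intro _ sA sB h; exact h
  | cons x t ih =>
    intro hxs sA sB h
    simp only [List.foldl_cons]
    have hx := hxs x List.mem_cons_self
    exact ih (fun q hq => hxs q (List.mem_cons_of_mem _ hq)) _ _
      (step_rel mx my sA sB x y hx.1 hx.2 hy0 hy' h)

theorem fold_outer (mx my : Int) :
    ∀ (ys : List Int), (∀ y ∈ ys, 0 ≤ y ∧ y < my) →
    ∀ sA sB, SimRel mx my sA sB →
    SimRel mx my
      (ys.foldl (fun s y =>
        (PySem.List.pyRange 0 mx 1).foldl (fun s x => stepA mx my s x y) s) sA)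
      (ys.foldl (fun s y =>
        (PySem.List.pyRange 0 mx 1).foldl (fun s x => visitB mx my s x y) s) sB) := by
  intro ys
  induction ys with
  | nil => intro _ sA sB h; exact h
  | cons y t ih =>
    intro hys sA sB h
    simp only [List.foldl_cons]
    have hy := hys y List.mem_cons_self
    refine ih (fun q hq => hys q (List.mem_cons_of_mem _ hq)) _ _ ?_
    exact fold_inner mx my y hy.1 hy.2 _ (fun x hx => by
      rw [PySem.List.mem_pyRange_one] at hx; exact hx) sA sB h

-- ===== VERDICT (by name: the statement is the Claim_ definition above) =====
theorem solve2_BFS_spec : Claim_equal_solve2_BFS := by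
  unfold Claim_equal_solve2_BFS
  intro lines hdom hpre
  unfold Spec_solve2_BFS
  simp only [solve2_BFS, solve2_BFS_alt]
  set mx : Int := ((PySem.Chars.strip ((PySem.List.pyGetD lines 0 "").toList)).length : Int) with hmxdef
  set my : Int := (lines.length : Int) with hmydef
  set g0 : List (List Char) := lines.map (fun s => s.toList) with hg0def
  have h0 : SimRel mx my (g0, ([] : List (Int × Int)), (0 : Int))
      (initLive lines mx my, ([] : List (Int × Int)), (0 : Int)) := by
    refine ⟨initLive_ok lines mx my, rfl, rfl, ?_⟩
    intro q hq
    simp at hq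
  have hfold := fold_outer mx my (PySem.List.pyRange 0 my 1)
    (fun yy hyy => by rw [PySem.List.mem_pyRange_one] at hyy; exact hyy) _ _ h0
  obtain ⟨hok, hst, hret, hwf⟩ := hfold
  rw [hst, hret]
  exact loop_sim mx my _ _ _ _ hok (hst ▸ hwf)
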